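-- pv_equiv track=rewrite | github.com/k-ngo/boltzomics | mutation_discovery.py | is_conservative_substitution
-- ===== SOURCE A (Python) =====
-- def is_conservative_substitution(res1: str, res2: str) -> bool:
--     """Check if amino acid substitution is conservative."""
--     # Define conservative groups
--     conservative_groups = [
--         {'I', 'L', 'V', 'M', 'A', 'G'},  # Hydrophobic/aliphatic
--         {'F', 'Y', 'W'},                  # Aromatic
--         {'K', 'R', 'H'},                  # Positively charged
--         {'D', 'E'},                       # Negatively charged
--         {'S', 'T', 'N', 'Q'},             # Polar uncharged
--         {'C'},                            # Special (sulfur)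
--         {'P'},                            # Special (proline)
--     ]
--
--     for group in conservative_groups:
--         if res1 in group and res2 in group:
--             return True
--     return False
-- ===== SOURCE B (Python) =====
-- def is_conservative_substitution(res1: str, res2: str) -> bool:
--     """Check if amino acid substitution is conservative."""
--     groups = ["ILVMAG", "FYW", "KRH", "DE", "STNQ", "C", "P"]
--     aa_to_group = {aa: i for i, g in enumerate(groups) for aa in g}
--     g1 = aa_to_group.get(res1)
--     return g1 is not None and g1 == aa_to_group.get(res2)
-- ===== Notes on version B (the rewrite author's own statement) =====
-- stated objective: idiomatic
-- what changed: Replaces the per-call scan over seven group sets with a single precomputed residue-to-group-index dict and one lookup comparison (absent residues map to None, so two unknown residues never compare equal).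
import Mathlib
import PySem

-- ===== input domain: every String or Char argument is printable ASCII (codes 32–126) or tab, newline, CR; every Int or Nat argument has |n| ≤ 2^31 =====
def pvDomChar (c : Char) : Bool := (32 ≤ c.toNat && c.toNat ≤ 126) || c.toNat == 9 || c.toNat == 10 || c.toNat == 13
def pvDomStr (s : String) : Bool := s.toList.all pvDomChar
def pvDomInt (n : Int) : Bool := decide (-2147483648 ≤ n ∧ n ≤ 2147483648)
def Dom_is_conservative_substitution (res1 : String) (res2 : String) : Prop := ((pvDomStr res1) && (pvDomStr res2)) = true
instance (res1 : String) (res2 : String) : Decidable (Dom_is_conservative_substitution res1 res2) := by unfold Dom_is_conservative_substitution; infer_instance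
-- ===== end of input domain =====

-- B replaces A's scan over seven sets with a single precomputed residue→group-index dict and one lookup comparison (objective: idiomatic).


-- ===== PORT A =====
-- the seven conservative groups, as Python sets of one-character residue strings
def pvGroupsA : List (PySem.Set String) :=
  [PySem.Set.ofList ["I", "L", "V", "M", "A", "G"],
   PySem.Set.ofList ["F", "Y", "W"],
   PySem.Set.ofList ["K", "R", "H"],
   PySem.Set.ofList ["D", "E"],
   PySem.Set.ofList ["S", "T", "N", "Q"],
   PySem.Set.ofList ["C"],
   PySem.Set.ofList ["P"]]

-- 'for group in conservative_groups: if res1 in group and res2 in group: return True' / 'return False'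
def pvLoopA (res1 res2 : String) : List (PySem.Set String) → Bool
  | [] => false
  | g :: rest =>
      if PySem.Set.contains g res1 && PySem.Set.contains g res2 then true
      else pvLoopA res1 res2 rest

def is_conservative_substitution (res1 : String) (res2 : String) : Bool :=
  pvLoopA res1 res2 pvGroupsA

-- ===== PORT B =====
-- groups = ["ILVMAG", ...]; iterating a Python string yields its one-character strings
def pvGroupsB : List (List String) :=
  [["I", "L", "V", "M", "A", "G"],
   ["F", "Y", "W"],
   ["K", "R", "H"],
   ["D", "E"],
   ["S", "T", "N", "Q"],
   ["C"],
   ["P"]]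

-- aa_to_group = {aa: i for i, g in enumerate(groups) for aa in g}
def pvAaToGroup : PySem.Dict String Int :=
  (PySem.List.enumerate pvGroupsB).foldl
    (fun d ig => ig.2.foldl (fun d aa => d.insert aa ig.1) d)
    PySem.Dict.empty

-- g1 = aa_to_group.get(res1); return g1 is not None and g1 == aa_to_group.get(res2)
def is_conservative_substitution_alt (res1 : String) (res2 : String) : Bool :=
  match pvAaToGroup.get? res1 with
  | none => false
  | some g1 => pvAaToGroup.get? res2 == some g1

-- ===== PRECONDITION & SPEC =====
def Spec_is_conservative_substitution (res1 : String) (res2 : String) (out : Bool) : Prop := out = is_conservative_substitution_alt res1 res2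
instance (res1 : String) (res2 : String) (out : Bool) : Decidable (Spec_is_conservative_substitution res1 res2 out) := by unfold Spec_is_conservative_substitution; infer_instance

-- ===== CLAIM (what is proved, stated in full; the proofs are below) =====
def Claim_equal_is_conservative_substitution : Prop := ∀ (res1 : String) (res2 : String), Dom_is_conservative_substitution res1 res2 → Spec_is_conservative_substitution res1 res2 (is_conservative_substitution res1 res2)

-- ===== LEMMAS AND PROOFS =====

-- the 20 residues that occur in some group
def pvKeys : List String :=
  ["I", "L", "V", "M", "A", "G", "F", "Y", "W", "K",
   "R", "H", "D", "E", "S", "T", "N", "Q", "C", "P"]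

-- a residue matching none of the 20 keys
def pvNotKey (r : String) : Prop :=
  r ≠ "I" ∧ r ≠ "L" ∧ r ≠ "V" ∧ r ≠ "M" ∧ r ≠ "A" ∧ r ≠ "G" ∧
  r ≠ "F" ∧ r ≠ "Y" ∧ r ≠ "W" ∧ r ≠ "K" ∧ r ≠ "R" ∧ r ≠ "H" ∧
  r ≠ "D" ∧ r ≠ "E" ∧ r ≠ "S" ∧ r ≠ "T" ∧ r ≠ "N" ∧ r ≠ "Q" ∧
  r ≠ "C" ∧ r ≠ "P"

lemma pvKeyCases (r : String) : r ∈ pvKeys ∨ pvNotKey r := by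
  by_cases h : r ∈ pvKeys
  · exact Or.inl h
  · refine Or.inr ?_
    simp [pvKeys] at h
    simpa [pvNotKey] using h

lemma pvGet?_notKey (r : String) (h : pvNotKey r) : pvAaToGroup.get? r = none := by
  obtain ⟨h1,h2,h3,h4,h5,h6,h7,h8,h9,h10,h11,h12,h13,h14,h15,h16,h17,h18,h19,h20⟩ := h
  simp [pvAaToGroup, pvGroupsB, PySem.List.enumerate,
        PySem.Dict.get?, PySem.Dict.insert, PySem.Dict.empty, List.find?, beq_eq_decide,
        h1.symm,h2.symm,h3.symm,h4.symm,h5.symm,h6.symm,h7.symm,h8.symm,h9.symm,h10.symm,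
        h11.symm,h12.symm,h13.symm,h14.symm,h15.symm,h16.symm,h17.symm,h18.symm,h19.symm,h20.symm]

lemma pvA_notKey_left (r1 r2 : String) (h : pvNotKey r1) :
    is_conservative_substitution r1 r2 = false := by
  obtain ⟨h1,h2,h3,h4,h5,h6,h7,h8,h9,h10,h11,h12,h13,h14,h15,h16,h17,h18,h19,h20⟩ := h
  simp [is_conservative_substitution, pvLoopA, pvGroupsA, PySem.Set.contains,
        PySem.Set.ofList, PySem.Set.add, h1,h2,h3,h4,h5,h6,h7,h8,h9,h10,
        h11,h12,h13,h14,h15,h16,h17,h18,h19,h20]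

lemma pvA_notKey_right (r1 r2 : String) (h : pvNotKey r2) :
    is_conservative_substitution r1 r2 = false := by
  obtain ⟨h1,h2,h3,h4,h5,h6,h7,h8,h9,h10,h11,h12,h13,h14,h15,h16,h17,h18,h19,h20⟩ := h
  simp [is_conservative_substitution, pvLoopA, pvGroupsA, PySem.Set.contains,
        PySem.Set.ofList, PySem.Set.add, h1,h2,h3,h4,h5,h6,h7,h8,h9,h10,
        h11,h12,h13,h14,h15,h16,h17,h18,h19,h20]

lemma pvB_notKey_left (r1 r2 : String) (h : pvNotKey r1) :
    is_conservative_substitution_alt r1 r2 = false := by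
  simp [is_conservative_substitution_alt, pvGet?_notKey r1 h]

lemma pvB_notKey_right (r1 r2 : String) (h : pvNotKey r2) :
    is_conservative_substitution_alt r1 r2 = false := by
  unfold is_conservative_substitution_alt
  rw [pvGet?_notKey r2 h]
  cases pvAaToGroup.get? r1 <;> rfl

set_option maxHeartbeats 2000000 in
lemma pvKeyKey : ∀ x ∈ pvKeys, ∀ y ∈ pvKeys,
    is_conservative_substitution x y = is_conservative_substitution_alt x y := by decide

-- ===== VERDICT (by name: the statement is the Claim_ definition above) =====
theorem is_conservative_substitution_spec : Claim_equal_is_conservative_substitution := by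
  intro r1 r2 _
  unfold Spec_is_conservative_substitution
  rcases pvKeyCases r1 with h1 | h1
  · rcases pvKeyCases r2 with h2 | h2
    · exact pvKeyKey r1 h1 r2 h2
    · rw [pvA_notKey_right r1 r2 h2, pvB_notKey_right r1 r2 h2]
  · rw [pvA_notKey_left r1 r2 h1, pvB_notKey_left r1 r2 h1]
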